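-- pv_equiv track=rewrite | github.com/a-nogikh/ruwiki-vandalism-detection | features/text_char_statistics.py | check_cut
-- ===== SOURCE A (Python) =====
-- def check_cut(orig: str, cut:str):
--     if len(orig) <= len(cut):
--         return False
--
--     diff_pos = 0
--     for i, c in enumerate(orig):
--         if i >= len(cut) or cut[i] != c:
--             diff_pos = i
--             break
--
--     orig_left = orig[diff_pos:]
--     cut_left = cut[diff_pos:]
--
--     len_diff = len(orig_left) - len(cut_left)
--     orig_left = orig_left[len_diff:]
--     return orig_left == cut_left
-- ===== SOURCE B (Python) =====
-- def check_cut(orig: str, cut: str):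
--     if len(orig) <= len(cut):
--         return False
--
--     def common(a, b):
--         n = 0
--         for x, y in zip(a, b):
--             if x != y:
--                 break
--             n += 1
--         return n
--
--     p = common(orig, cut)                      # common prefix length
--     s = common(orig[::-1], cut[::-1])          # common suffix length
--     return p + s >= len(cut)
-- ===== Notes on version B (the rewrite author's own statement) =====
-- stated objective: alternative
-- what changed: Replaces A's single forward scan plus aligned-suffix-slice equality with two symmetric end scans that count the common-prefix and common-suffix lengths and test p + s >= len(cut).
import Mathlib
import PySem

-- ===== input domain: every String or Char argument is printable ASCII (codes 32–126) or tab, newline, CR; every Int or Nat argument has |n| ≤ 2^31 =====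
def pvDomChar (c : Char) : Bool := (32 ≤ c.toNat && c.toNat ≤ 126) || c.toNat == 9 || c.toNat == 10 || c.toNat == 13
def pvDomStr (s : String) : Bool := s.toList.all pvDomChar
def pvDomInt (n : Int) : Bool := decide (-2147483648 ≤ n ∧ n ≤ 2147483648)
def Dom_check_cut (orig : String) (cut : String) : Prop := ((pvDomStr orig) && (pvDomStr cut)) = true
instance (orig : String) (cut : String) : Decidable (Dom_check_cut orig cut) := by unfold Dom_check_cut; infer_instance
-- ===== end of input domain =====

-- B replaces A's forward scan + aligned-suffix-slice equality by two symmetric end scans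
-- (common-prefix length p, common-suffix length s) and the test p + s ≥ len(cut); same cost, different decomposition.

-- ===== PORT A =====
-- Python's `for i, c in enumerate(orig)` with break: structural recursion carrying the index i.
-- `cut[i]` is only read when i < len(cut) (short-circuit `or`), so `getD` is exact there.
def aLoop (c : List Char) (i : Nat) : List Char → Nat
  | [] => 0                                   -- loop finished without break: diff_pos keeps its initial 0
  | ch :: rest => if c.length ≤ i ∨ c.getD i ' ' ≠ ch then i else aLoop c (i + 1) rest

def check_cut (orig : String) (cut : String) : Bool :=
  let o := orig.toList
  let c := cut.toList
  if o.length ≤ c.length then false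
  else
    let diff_pos := aLoop c 0 o
    let orig_left := o.drop diff_pos          -- orig[diff_pos:] with diff_pos ≥ 0: exact
    let cut_left := c.drop diff_pos           -- cut[diff_pos:]
    let len_diff := orig_left.length - cut_left.length   -- ≥ 0 here, so Nat subtraction is exact
    decide (orig_left.drop len_diff = cut_left)          -- orig_left[len_diff:] == cut_left

-- ===== PORT B =====
-- Source B's `common`: count matching pairs of zip(a, b) from the front until a mismatch.
def commonLen : List Char → List Char → Nat
  | x :: xs, y :: ys => if x = y then commonLen xs ys + 1 else 0
  | _, _ => 0

def check_cut_alt (orig : String) (cut : String) : Bool :=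
  let o := orig.toList
  let c := cut.toList
  if o.length ≤ c.length then false
  else
    let p := commonLen o c                            -- common prefix length
    let s := commonLen o.reverse c.reverse            -- common suffix length (orig[::-1], cut[::-1])
    decide (c.length ≤ p + s)                         -- p + s >= len(cut)

-- ===== PRECONDITION & SPEC =====
def Spec_check_cut (orig : String) (cut : String) (out : Bool) : Prop := out = check_cut_alt orig cut
instance (orig : String) (cut : String) (out : Bool) : Decidable (Spec_check_cut orig cut out) := by unfold Spec_check_cut; infer_instance

-- ===== CLAIM (what is proved, stated in full; the proofs are below) =====
def Claim_equal_check_cut : Prop := ∀ (orig : String) (cut : String), Dom_check_cut orig cut → Spec_check_cut orig cut (check_cut orig cut)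

-- ===== LEMMAS AND PROOFS =====

theorem commonLen_le_left : ∀ (a b : List Char), commonLen a b ≤ a.length
  | [], _ => by simp [commonLen]
  | _ :: _, [] => by simp [commonLen]
  | x :: xs, y :: ys => by
    simp only [commonLen]
    split
    · simpa using commonLen_le_left xs ys
    · simp

theorem commonLen_le_right : ∀ (a b : List Char), commonLen a b ≤ b.length
  | [], _ => by simp [commonLen]
  | _ :: _, [] => by simp [commonLen]
  | x :: xs, y :: ys => by
    simp only [commonLen]
    split
    · simpa using commonLen_le_right xs ys
    · simp

-- k ≤ commonLen a b  ↔  the first k characters agree (for k within both lengths).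
theorem commonLen_take : ∀ (a b : List Char) (k : Nat), k ≤ a.length → k ≤ b.length →
    (k ≤ commonLen a b ↔ a.take k = b.take k)
  | _, _, 0 => by simp
  | [], _, k + 1 => by simp
  | _ :: _, [], k + 1 => by simp
  | x :: xs, y :: ys, k + 1 => by
    intro ha hb
    simp only [List.length_cons, Nat.add_le_add_iff_right] at ha hb
    simp only [commonLen, List.take_succ_cons]
    split
    · next hxy =>
      subst hxy
      rw [Nat.add_le_add_iff_right]
      simpa using commonLen_take xs ys k ha hb
    · next hxy =>
      constructor
      · omega
      · intro h
        exact absurd (List.cons.injEq .. ▸ h).1 hxy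

-- A's loop computes the common-prefix length, provided the break is guaranteed to fire
-- (which len(orig) > len(cut) ensures at i = len(cut) at the latest).
theorem aLoop_eq : ∀ (o' : List Char) (c : List Char) (i : Nat), i ≤ c.length → c.length < i + o'.length →
    aLoop c i o' = i + commonLen o' (c.drop i)
  | [], c, i => by intro h1 h2; simp at h2; omega
  | ch :: rest, c, i => by
    intro h1 h2
    simp only [aLoop]
    split
    · next hbr =>
      by_cases hci : c.length ≤ i
      · simp [List.drop_eq_nil_of_le hci, commonLen]
      · have hi : i < c.length := by omega
        have hne : c.getD i ' ' ≠ ch := by tauto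
        rw [List.getD_eq_getElem c ' ' hi] at hne
        rw [List.drop_eq_getElem_cons hi]
        simp only [commonLen]
        split
        · next h => exact absurd h.symm hne
        · omega
    · next hbr =>
      have hlt : i < c.length := by
        by_contra h
        exact hbr (Or.inl (by omega))
      have heq : c.getD i ' ' = ch := by
        by_contra h
        exact hbr (Or.inr h)
      rw [List.getD_eq_getElem c ' ' hlt] at heq
      rw [aLoop_eq rest c (i + 1) (by omega) (by simp only [List.length_cons] at h2; omega)]
      rw [List.drop_eq_getElem_cons hlt, heq]
      simp [commonLen]
      omega

-- suffix-of-length-k equality, phrased through reverses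
theorem drop_suffix_eq (a : List Char) (k : Nat) :
    a.drop (a.length - k) = (a.reverse.take k).reverse := by
  rw [List.take_reverse, List.reverse_reverse]

-- ===== VERDICT (by name: the statement is the Claim_ definition above) =====
theorem check_cut_spec : Claim_equal_check_cut := by
  intro orig cut _
  unfold Spec_check_cut check_cut check_cut_alt
  set o := orig.toList with ho
  set c := cut.toList with hc
  by_cases hlen : o.length ≤ c.length
  · simp [hlen]
  · simp only [if_neg hlen]
    rw [not_le] at hlen
    have hd : aLoop c 0 o = commonLen o c := by
      have := aLoop_eq o c 0 (by omega) (by omega)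
      simpa using this
    rw [hd]
    set d := commonLen o c with hdd
    have hdc : d ≤ c.length := commonLen_le_right o c
    set k := c.length - d with hk
    have hko : k ≤ o.length := by omega
    have hkc : k ≤ c.length := by omega
    rw [decide_eq_decide]
    have hlens : (o.drop d).length - (c.drop d).length = o.length - c.length := by
      simp [List.length_drop]; omega
    rw [hlens, List.drop_drop]
    have h1 : d + (o.length - c.length) = o.length - k := by omega
    have h2 : d = c.length - k := by omega
    rw [h1]
    conv_lhs => rw [h2]
    rw [drop_suffix_eq o k, drop_suffix_eq c k, List.reverse_inj]
    rw [← commonLen_take o.reverse c.reverse k (by simpa using hko) (by simpa using hkc)]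
    omega
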